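-- pv_equiv track=rewrite | github.com/chetTEst/lesson215 | utilities.py | count_bits_in_file
-- ===== SOURCE A (Python) =====
-- def count_bits_in_file(data_from_list): # Функция подсчета бит = 1 и бит = 1 идущих подряд с конца файла и подряд идущих 0 с начала файла
--     total_ones = sum(sum((byte >> i) & 1 for i in range(8)) for byte in data_from_list)
--     # Подсчет количества подряд идущих единиц с конца файла
--     ones_at_end = 0
--     for byte in reversed(data_from_list):
--         for i in range(8):
--             if (byte >> i) & 1:
--                 ones_at_end += 1
--             else:
--                 break
--     zero_at_start = 0
--     byte = data_from_list[0]
--     for i in range(8):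
--         if not (byte << i) & 128:
--             zero_at_start += 1
--         else:
--             break
--     return [total_ones, ones_at_end, zero_at_start]
-- ===== SOURCE B (Python) =====
-- # Table-driven: two 256-entry tables built once by DP (entry v derived from entry v>>1),
-- # one combined pass over the data, and a bit_length closed form for the leading zeros.
-- POPCOUNT = []
-- TRAIL1 = []
-- for _v in range(256):
--     POPCOUNT.append(POPCOUNT[_v >> 1] + (_v & 1) if _v else 0)
--     TRAIL1.append(TRAIL1[_v >> 1] + 1 if _v & 1 else 0)
--
-- def count_bits_in_file(data_from_list):
--     total_ones = 0
--     ones_at_end = 0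
--     for byte in data_from_list:
--         r = byte % 256
--         total_ones += POPCOUNT[r]
--         ones_at_end += TRAIL1[r]
--     zero_at_start = 8 - (data_from_list[0] % 256).bit_length()
--     return [total_ones, ones_at_end, zero_at_start]
-- ===== Notes on version B (the rewrite author's own statement) =====
-- stated objective: faster
-- what changed: Replaces A's three per-byte 8-iteration bit loops (popcount sum, trailing-ones loop with break, leading-zero loop) by two 256-entry lookup tables built once by DP plus a single combined pass over the data and a bit_length closed form for the leading zeros; Pre_ excludes only the empty list, on which both raise IndexError when indexing the first element.
import Mathlib
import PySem

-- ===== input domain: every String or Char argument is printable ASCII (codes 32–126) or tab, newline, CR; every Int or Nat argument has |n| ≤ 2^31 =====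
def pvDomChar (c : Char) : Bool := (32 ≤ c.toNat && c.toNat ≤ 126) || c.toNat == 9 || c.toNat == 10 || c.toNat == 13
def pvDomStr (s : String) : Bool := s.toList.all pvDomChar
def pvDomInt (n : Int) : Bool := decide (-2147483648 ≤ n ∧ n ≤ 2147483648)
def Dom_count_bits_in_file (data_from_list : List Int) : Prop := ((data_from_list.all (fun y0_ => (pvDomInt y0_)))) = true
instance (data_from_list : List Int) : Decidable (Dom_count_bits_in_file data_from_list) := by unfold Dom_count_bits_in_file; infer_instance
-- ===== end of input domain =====

-- B replaces A's per-byte bit loops by two 256-entry lookup tables built once by DP plus a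
-- bit_length closed form for the leading zeros; equivalence is about the return value only.

-- ===== PORT A =====
-- sum((byte >> i) & 1 for i in range(8))  (range(8) ported as List.range 8: indices are the Nats 0..7)
def pvBitsA (b : Int) : Int :=
  ((List.range 8).map (fun (i : Nat) => PySem.Int.band (b >>> i) 1)).sum

-- inner 'for i in range(8): if (byte >> i) & 1: ones += 1 else: break'
def pvTrailA (b : Int) : List Nat → Int → Int
  | [], acc => acc
  | i :: rest, acc =>
    if PySem.Int.band (b >>> i) 1 ≠ 0 then pvTrailA b rest (acc + 1) else acc

-- 'for i in range(8): if not (byte << i) & 128: zero += 1 else: break'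
def pvLeadA (b : Int) : List Nat → Int → Int
  | [], acc => acc
  | i :: rest, acc =>
    if PySem.Int.band (b <<< i) 128 = 0 then pvLeadA b rest (acc + 1) else acc

def count_bits_in_file (data_from_list : List Int) : List Int :=
  match PySem.List.pyGet? data_from_list 0 with
  | none => []   -- indexing the first element raises IndexError on the empty list; excluded by Pre_
  | some byte0 =>
    let total_ones := (data_from_list.map pvBitsA).sum
    let ones_at_end :=
      data_from_list.reverse.foldl (fun acc b => pvTrailA b (List.range 8) acc) 0
    let zero_at_start := pvLeadA byte0 (List.range 8) 0
    [total_ones, ones_at_end, zero_at_start]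

-- ===== PORT B =====
-- the module-level table build: POPCOUNT[v] = POPCOUNT[v>>1] + (v&1), TRAIL1[v] = TRAIL1[v>>1]+1 if v odd else 0
def pvTables : List Int × List Int :=
  (List.range 256).foldl
    (fun acc v =>
      (acc.1 ++ [if v ≠ 0 then acc.1.getD (v >>> 1) 0 + ((v &&& 1 : Nat) : Int) else 0],
       acc.2 ++ [if v &&& 1 ≠ 0 then acc.2.getD (v >>> 1) 0 + 1 else 0]))
    ([], [])

def count_bits_in_file_alt (data_from_list : List Int) : List Int :=
  let acc := data_from_list.foldl
    (fun (acc : Int × Int) byte =>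
      (acc.1 + pvTables.1.getD (PySem.Int.mod byte 256).toNat 0,
       acc.2 + pvTables.2.getD (PySem.Int.mod byte 256).toNat 0)) (0, 0)
  match PySem.List.pyGet? data_from_list 0 with
  | none => []   -- indexing the first element raises IndexError on the empty list; excluded by Pre_
  | some byte0 =>
    [acc.1, acc.2, 8 - (PySem.Int.bitLength (PySem.Int.mod byte0 256) : Int)]

-- ===== PRECONDITION & SPEC =====
-- Pre_ excludes only the empty list, on which both Pythons raise IndexError when indexing the first element.
def Pre_count_bits_in_file (data_from_list : List Int) : Prop := data_from_list ≠ []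
instance (data_from_list : List Int) : Decidable (Pre_count_bits_in_file data_from_list) := by
  unfold Pre_count_bits_in_file; infer_instance

def pvWitness_count_bits_in_file : List Int := [5]

def Spec_count_bits_in_file (data_from_list : List Int) (out : List Int) : Prop :=
  out = count_bits_in_file_alt data_from_list
instance (data_from_list : List Int) (out : List Int) :
    Decidable (Spec_count_bits_in_file data_from_list out) := by
  unfold Spec_count_bits_in_file; infer_instance

-- ===== CLAIM (what is proved, stated in full; the proofs are below) =====
def Claim_equal_count_bits_in_file : Prop :=
  ∀ (data_from_list : List Int), Dom_count_bits_in_file data_from_list →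
    Pre_count_bits_in_file data_from_list →
    Spec_count_bits_in_file data_from_list (count_bits_in_file data_from_list)

-- ===== LEMMAS AND PROOFS =====
def pvPOP : List Int := [0, 1, 1, 2, 1, 2, 2, 3, 1, 2, 2, 3, 2, 3, 3, 4, 1, 2, 2, 3, 2, 3, 3, 4, 2, 3, 3, 4, 3, 4, 4, 5, 1, 2, 2, 3, 2, 3, 3, 4, 2, 3, 3, 4, 3, 4, 4, 5, 2, 3, 3, 4, 3, 4, 4, 5, 3, 4, 4, 5, 4, 5, 5, 6, 1, 2, 2, 3, 2, 3, 3, 4, 2, 3, 3, 4, 3, 4, 4, 5, 2, 3, 3, 4, 3, 4, 4, 5, 3, 4, 4, 5, 4, 5, 5, 6, 2, 3, 3, 4, 3, 4, 4, 5, 3, 4, 4, 5, 4, 5, 5, 6, 3, 4, 4, 5, 4, 5, 5, 6, 4, 5, 5, 6, 5, 6, 6, 7, 1, 2, 2, 3, 2, 3, 3, 4, 2, 3, 3, 4, 3, 4, 4, 5, 2, 3, 3, 4, 3, 4, 4, 5, 3, 4, 4, 5, 4, 5, 5, 6, 2, 3, 3, 4, 3, 4, 4, 5, 3, 4, 4,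 5, 4, 5, 5, 6, 3, 4, 4, 5, 4, 5, 5, 6, 4, 5, 5, 6, 5, 6, 6, 7, 2, 3, 3, 4, 3, 4, 4, 5, 3, 4, 4, 5, 4, 5, 5, 6, 3, 4, 4, 5, 4, 5, 5, 6, 4, 5, 5, 6, 5, 6, 6, 7, 3, 4, 4, 5, 4, 5, 5, 6, 4, 5, 5, 6, 5, 6, 6, 7, 4, 5, 5, 6, 5, 6, 6, 7, 5, 6, 6, 7, 6, 7, 7, 8]

def pvTR : List Int := [0, 1, 0, 2, 0, 1, 0, 3, 0, 1, 0, 2, 0, 1, 0, 4, 0, 1, 0, 2, 0, 1, 0, 3, 0, 1, 0, 2, 0, 1, 0, 5, 0, 1, 0, 2, 0, 1, 0, 3, 0, 1, 0, 2, 0, 1, 0, 4, 0, 1, 0, 2, 0, 1, 0, 3, 0, 1, 0, 2, 0, 1, 0, 6, 0, 1, 0, 2, 0, 1, 0, 3, 0, 1, 0, 2, 0, 1, 0, 4, 0, 1, 0, 2, 0, 1, 0, 3, 0, 1, 0, 2, 0, 1, 0, 5, 0, 1, 0, 2, 0, 1, 0, 3, 0, 1, 0, 2, 0, 1, 0, 4,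 0, 1, 0, 2, 0, 1, 0, 3, 0, 1, 0, 2, 0, 1, 0, 7, 0, 1, 0, 2, 0, 1, 0, 3, 0, 1, 0, 2, 0, 1, 0, 4, 0, 1, 0, 2, 0, 1, 0, 3, 0, 1, 0, 2, 0, 1, 0, 5, 0, 1, 0, 2, 0, 1, 0, 3, 0, 1, 0, 2, 0, 1, 0, 4, 0, 1, 0, 2, 0, 1, 0, 3, 0, 1, 0, 2, 0, 1, 0, 6, 0, 1, 0, 2, 0, 1, 0, 3, 0, 1, 0, 2, 0, 1, 0, 4, 0, 1, 0, 2, 0, 1, 0, 3, 0, 1, 0, 2, 0, 1, 0, 5, 0, 1, 0, 2, 0, 1, 0, 3, 0, 1, 0, 2, 0, 1, 0, 4, 0, 1, 0, 2, 0, 1, 0, 3, 0, 1, 0, 2, 0, 1, 0, 8]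

set_option maxRecDepth 100000 in
lemma pvTables_eq : pvTables = (pvPOP, pvTR) := by decide

lemma range8_eq : (List.range 8 : List Nat) = [0,1,2,3,4,5,6,7] := rfl

lemma bit_mod (b : Int) (i : Nat) (h : i < 8) :
    PySem.Int.band (b >>> i) 1 = PySem.Int.band ((PySem.Int.mod b 256) >>> i) 1 := by
  rw [PySem.Int.band_one, PySem.Int.band_one,
      Int.shiftRight_eq_div_pow, Int.shiftRight_eq_div_pow,
      PySem.Int.mod_eq_emod_of_pos (by norm_num : (0:Int) < 2),
      PySem.Int.mod_eq_emod_of_pos (by norm_num : (0:Int) < 2),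
      PySem.Int.mod_eq_emod_of_pos (by norm_num : (0:Int) < 256)]
  interval_cases i <;> norm_num <;> omega

lemma band128 (a : Int) : PySem.Int.band a 128 = a % 256 - a % 128 := by
  unfold PySem.Int.band
  split_ifs with h1 h2 h2
  · have h7 : ((128:Int).toNat) = 2 ^ 7 := rfl
    rw [h7, Nat.and_two_pow, Nat.testBit_eq_decide_div_mod_eq]
    by_cases hb : a.toNat / 2 ^ 7 % 2 = 1 <;>
      simp only [hb, decide_true, decide_false, Bool.toNat_true, Bool.toNat_false] <;>
      push_cast <;> omega
  · norm_num at h2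
  · have h7 : ((128:Int).toNat) = 2 ^ 7 := rfl
    rw [h7, Nat.and_comm, Nat.and_two_pow, Nat.testBit_eq_decide_div_mod_eq]
    by_cases hb : (-a - 1).toNat / 2 ^ 7 % 2 = 1 <;>
      simp only [hb, decide_true, decide_false, Bool.toNat_true, Bool.toNat_false] <;>
      push_cast <;> omega
  · norm_num at h2

lemma leadbit_mod (b : Int) (i : Nat) (h : i < 8) :
    PySem.Int.band (b <<< i) 128 = PySem.Int.band ((PySem.Int.mod b 256) <<< i) 128 := by
  rw [band128, band128, Int.shiftLeft_eq, Int.shiftLeft_eq,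
      PySem.Int.mod_eq_emod_of_pos (by norm_num : (0:Int) < 256)]
  interval_cases i <;> norm_num <;> omega

lemma bitsA_mod (b : Int) : pvBitsA b = pvBitsA (PySem.Int.mod b 256) := by
  simp only [pvBitsA, range8_eq, List.map_cons, List.map_nil, List.sum_cons, List.sum_nil]
  rw [bit_mod b 0 (by omega), bit_mod b 1 (by omega), bit_mod b 2 (by omega),
      bit_mod b 3 (by omega), bit_mod b 4 (by omega), bit_mod b 5 (by omega),
      bit_mod b 6 (by omega), bit_mod b 7 (by omega)]

lemma trailA_mod (b : Int) :
    pvTrailA b (List.range 8) 0 = pvTrailA (PySem.Int.mod b 256) (List.range 8) 0 := by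
  rw [range8_eq]; simp only [pvTrailA]
  rw [bit_mod b 0 (by omega), bit_mod b 1 (by omega), bit_mod b 2 (by omega),
      bit_mod b 3 (by omega), bit_mod b 4 (by omega), bit_mod b 5 (by omega),
      bit_mod b 6 (by omega), bit_mod b 7 (by omega)]

lemma leadA_mod (b : Int) :
    pvLeadA b (List.range 8) 0 = pvLeadA (PySem.Int.mod b 256) (List.range 8) 0 := by
  rw [range8_eq]; simp only [pvLeadA]
  rw [leadbit_mod b 0 (by omega), leadbit_mod b 1 (by omega), leadbit_mod b 2 (by omega),
      leadbit_mod b 3 (by omega), leadbit_mod b 4 (by omega), leadbit_mod b 5 (by omega),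
      leadbit_mod b 6 (by omega), leadbit_mod b 7 (by omega)]

set_option maxRecDepth 100000 in
lemma bits_tab : ∀ n : Fin 256, pvBitsA ((n : Nat) : Int) = pvPOP.getD (n : Nat) 0 := by decide

set_option maxRecDepth 100000 in
lemma trail_tab : ∀ n : Fin 256,
    pvTrailA ((n : Nat) : Int) (List.range 8) 0 = pvTR.getD (n : Nat) 0 := by decide

set_option maxRecDepth 100000 in
lemma lead_tab : ∀ n : Fin 256,
    pvLeadA ((n : Nat) : Int) (List.range 8) 0
      = 8 - (PySem.Int.bitLength ((n : Nat) : Int) : Int) := by decide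

lemma mod_cast_fin (b : Int) :
    ∃ n : Fin 256, PySem.Int.mod b 256 = ((n : Nat) : Int) := by
  have h0 : 0 ≤ PySem.Int.mod b 256 := PySem.Int.mod_nonneg b (by norm_num)
  have h1 : PySem.Int.mod b 256 < 256 := PySem.Int.mod_lt b (by norm_num)
  exact ⟨⟨(PySem.Int.mod b 256).toNat, by omega⟩, by simp; omega⟩

lemma bits_eq (b : Int) :
    pvBitsA b = pvTables.1.getD (PySem.Int.mod b 256).toNat 0 := by
  obtain ⟨n, hn⟩ := mod_cast_fin b
  rw [bitsA_mod, hn, pvTables_eq]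
  simpa using bits_tab n

lemma trail_eq (b : Int) :
    pvTrailA b (List.range 8) 0 = pvTables.2.getD (PySem.Int.mod b 256).toNat 0 := by
  obtain ⟨n, hn⟩ := mod_cast_fin b
  rw [trailA_mod, hn, pvTables_eq]
  simpa using trail_tab n

lemma lead_eq (b : Int) :
    pvLeadA b (List.range 8) 0 = 8 - (PySem.Int.bitLength (PySem.Int.mod b 256) : Int) := by
  obtain ⟨n, hn⟩ := mod_cast_fin b
  rw [leadA_mod, hn]
  exact lead_tab n

lemma trail_acc (b : Int) (l : List Nat) (acc : Int) :
    pvTrailA b l acc = acc + pvTrailA b l 0 := by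
  induction l generalizing acc with
  | nil => simp [pvTrailA]
  | cons i rest ih =>
    simp only [pvTrailA]
    split_ifs
    · rw [ih (acc + 1), ih (0 + 1)]; ring
    · ring

lemma foldA_trail (l : List Int) (acc : Int) :
    l.foldl (fun acc b => pvTrailA b (List.range 8) acc) acc
      = acc + (l.map (fun b => pvTrailA b (List.range 8) 0)).sum := by
  induction l generalizing acc with
  | nil => simp
  | cons b rest ih =>
    rw [List.foldl_cons, ih, trail_acc]
    simp only [List.map_cons, List.sum_cons]
    ring

lemma foldB_pair (l : List Int) (x y : Int) :
    l.foldl (fun (acc : Int × Int) byte =>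
        (acc.1 + pvTables.1.getD (PySem.Int.mod byte 256).toNat 0,
         acc.2 + pvTables.2.getD (PySem.Int.mod byte 256).toNat 0)) (x, y)
      = (x + (l.map (fun b => pvTables.1.getD (PySem.Int.mod b 256).toNat 0)).sum,
         y + (l.map (fun b => pvTables.2.getD (PySem.Int.mod b 256).toNat 0)).sum) := by
  induction l generalizing x y with
  | nil => simp
  | cons b rest ih =>
    simp only [List.foldl_cons, List.map_cons, List.sum_cons, ih]
    rw [Prod.mk.injEq]
    exact ⟨by ring, by ring⟩

lemma sum_map_reverse (l : List Int) (f : Int → Int) :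
    (l.reverse.map f).sum = (l.map f).sum := by
  rw [List.map_reverse, List.sum_reverse]

-- ===== VERDICT (by name: the statement is the Claim_ definition above) =====
set_option maxRecDepth 10000 in
theorem count_bits_in_file_spec : Claim_equal_count_bits_in_file := by
  intro data hdom hpre
  unfold Spec_count_bits_in_file
  obtain ⟨b0, rest, rfl⟩ := List.exists_cons_of_ne_nil hpre
  unfold count_bits_in_file count_bits_in_file_alt
  rw [PySem.List.pyGet?_zero_cons]
  simp only [foldB_pair]
  have h1 : ((b0 :: rest).map pvBitsA).sum
      = 0 + ((b0 :: rest).map (fun b => pvTables.1.getD (PySem.Int.mod b 256).toNat 0)).sum := by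
    rw [zero_add]
    congr 1
    exact List.map_congr_left (fun b _ => bits_eq b)
  have h2 : (b0 :: rest).reverse.foldl (fun acc b => pvTrailA b (List.range 8) acc) 0
      = 0 + ((b0 :: rest).map (fun b => pvTables.2.getD (PySem.Int.mod b 256).toNat 0)).sum := by
    rw [foldA_trail, ← sum_map_reverse (b0 :: rest)
          (fun b => pvTables.2.getD (PySem.Int.mod b 256).toNat 0)]

    exact congrArg (fun z => 0 + z)
      (congrArg List.sum (List.map_congr_left (fun b _ => trail_eq b)))
  rw [h1, h2, lead_eq]
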